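-- pv_equiv track=rewrite | github.com/evaarakchieva/yandexTraining4 | yandexContest/workout 4/warm-up/middle_level.py | count_dissatisfaction
-- ===== SOURCE A (Python) =====
-- def count_dissatisfaction(input_array_length, input_array):
--     array_of_dissatisfaction = [0] * input_array_length
--     for i in range(input_array_length):
--         sum_of_right = 0
--         for j in range (i + 1, input_array_length):
--             sum_of_right += input_array[j]
--         array_of_dissatisfaction[i] += (sum_of_right - input_array[i] * (input_array_length - i - 1))
--         sum_of_left = 0
--         for k in range(i):
--             sum_of_left += input_array[k]
--         array_of_dissatisfaction[i] += (input_array[i] * i - sum_of_left)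
--     return array_of_dissatisfaction
-- ===== SOURCE B (Python) =====
-- def count_dissatisfaction(input_array_length, input_array):
--     n = input_array_length
--     total = 0
--     for k in range(n):
--         total += input_array[k]
--     left = 0
--     result = []
--     for i in range(n):
--         x = input_array[i]
--         result.append(total - left - x - x * (n - i - 1) + x * i - left)
--         left += x
--     return result
-- ===== Notes on version B (the rewrite author's own statement) =====
-- stated objective: faster
-- what changed: Replaced the quadratic per-index left/right summation loops with a single pass keeping a running left prefix sum and the precomputed total, so each element's dissatisfaction is computed in O(1).
import Mathlib
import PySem

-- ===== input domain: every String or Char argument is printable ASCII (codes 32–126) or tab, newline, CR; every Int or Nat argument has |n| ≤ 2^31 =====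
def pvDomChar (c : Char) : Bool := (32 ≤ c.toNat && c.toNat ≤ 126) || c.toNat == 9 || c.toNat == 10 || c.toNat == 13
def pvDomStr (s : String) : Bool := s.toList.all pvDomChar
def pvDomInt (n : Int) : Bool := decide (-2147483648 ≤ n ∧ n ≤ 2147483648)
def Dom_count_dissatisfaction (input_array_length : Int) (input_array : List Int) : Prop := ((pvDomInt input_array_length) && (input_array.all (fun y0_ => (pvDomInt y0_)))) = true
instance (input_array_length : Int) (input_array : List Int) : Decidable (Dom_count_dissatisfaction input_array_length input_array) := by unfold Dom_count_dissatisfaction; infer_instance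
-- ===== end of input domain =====

-- B replaces A's quadratic per-index left/right summation loops with one pass over
-- a running left prefix sum plus the precomputed total (asymptotically faster).


-- ===== PORT A =====
def count_dissatisfaction (input_array_length : Int) (input_array : List Int) : List Int :=
  (PySem.List.pyRange 0 input_array_length 1).foldl (fun arr i =>
    let sum_of_right := (PySem.List.pyRange (i + 1) input_array_length 1).foldl
      (fun s j => s + PySem.List.pyGetD input_array j 0) 0
    let arr := PySem.List.pySetD arr i (PySem.List.pyGetD arr i 0 +
      (sum_of_right - PySem.List.pyGetD input_array i 0 * (input_array_length - i - 1)))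
    let sum_of_left := (PySem.List.pyRange 0 i 1).foldl
      (fun s k => s + PySem.List.pyGetD input_array k 0) 0
    PySem.List.pySetD arr i (PySem.List.pyGetD arr i 0 +
      (PySem.List.pyGetD input_array i 0 * i - sum_of_left)))
    (List.replicate input_array_length.toNat 0)

-- ===== PORT B =====
def count_dissatisfaction_alt (input_array_length : Int) (input_array : List Int) : List Int :=
  let n := input_array_length
  let total := (PySem.List.pyRange 0 n 1).foldl
    (fun s k => s + PySem.List.pyGetD input_array k 0) 0
  ((PySem.List.pyRange 0 n 1).foldl (fun (st : Int × List Int) i =>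
      let x := PySem.List.pyGetD input_array i 0
      (st.1 + x, st.2 ++ [total - st.1 - x - x * (n - i - 1) + x * i - st.1]))
    (0, [])).2

-- ===== PRECONDITION & SPEC =====
-- Pre_ excludes exactly the inputs where Python A raises IndexError:
-- input_array_length larger than the list's length.
def Pre_count_dissatisfaction (input_array_length : Int) (input_array : List Int) : Prop :=
  input_array_length ≤ (input_array.length : Int)
instance (input_array_length : Int) (input_array : List Int) : Decidable (Pre_count_dissatisfaction input_array_length input_array) := by unfold Pre_count_dissatisfaction; infer_instance

def pvWitness_count_dissatisfaction : Int × List Int := (3, [4, 1, 7])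

def Spec_count_dissatisfaction (input_array_length : Int) (input_array : List Int) (out : List Int) : Prop := out = count_dissatisfaction_alt input_array_length input_array
instance (input_array_length : Int) (input_array : List Int) (out : List Int) : Decidable (Spec_count_dissatisfaction input_array_length input_array out) := by unfold Spec_count_dissatisfaction; infer_instance

-- ===== CLAIM (what is proved, stated in full; the proofs are below) =====
def Claim_equal_count_dissatisfaction : Prop := ∀ (input_array_length : Int) (input_array : List Int), Dom_count_dissatisfaction input_array_length input_array → Pre_count_dissatisfaction input_array_length input_array → Spec_count_dissatisfaction input_array_length input_array (count_dissatisfaction input_array_length input_array)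

-- ===== LEMMAS AND PROOFS =====

-- sum of input_array over indices [lo, hi)
def sumIdx (a : List Int) (lo hi : Int) : Int :=
  ((PySem.List.pyRange lo hi 1).map (fun j => PySem.List.pyGetD a j 0)).sum

-- the per-index dissatisfaction value both loops compute
def fval (n : Int) (a : List Int) (i : Int) : Int :=
  sumIdx a (i + 1) n - PySem.List.pyGetD a i 0 * (n - i - 1)
    + (PySem.List.pyGetD a i 0 * i - sumIdx a 0 i)

theorem sumIdx_nil (a : List Int) {lo hi : Int} (h : hi ≤ lo) : sumIdx a lo hi = 0 := by
  unfold sumIdx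
  rw [PySem.List.pyRange_one_eq_nil h]
  rfl

theorem sumIdx_cons (a : List Int) {lo hi : Int} (h : lo < hi) :
    sumIdx a lo hi = PySem.List.pyGetD a lo 0 + sumIdx a (lo + 1) hi := by
  unfold sumIdx
  rw [PySem.List.pyRange_one_cons h]
  simp

theorem sumIdx_split (a : List Int) {lo mid hi : Int} (h1 : lo ≤ mid) (h2 : mid ≤ hi) :
    sumIdx a lo hi = sumIdx a lo mid + sumIdx a mid hi := by
  unfold sumIdx
  rw [PySem.List.pyRange_one_append lo mid hi h1 h2]
  simp

theorem foldSum_eq (a : List Int) : ∀ (k : Nat) (lo hi s : Int), lo + k = hi →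
    (PySem.List.pyRange lo hi 1).foldl (fun s j => s + PySem.List.pyGetD a j 0) s
      = s + sumIdx a lo hi := by
  intro k
  induction k with
  | zero =>
      intro lo hi s h
      rw [PySem.List.pyRange_one_eq_nil (by omega), sumIdx_nil a (by omega)]
      simp
  | succ m ih =>
      intro lo hi s h
      rw [PySem.List.pyRange_one_cons (by omega), sumIdx_cons a (by omega)]
      simp only [List.foldl_cons]
      rw [ih (lo + 1) hi _ (by omega)]
      ring

-- A's loop: folding from lo with the first lo entries already filled fills the rest.
theorem loopA (n : Int) (a : List Int) : ∀ (k : Nat) (lo : Int), 0 ≤ lo → lo + k = n →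
    (PySem.List.pyRange lo n 1).foldl (fun arr i =>
      PySem.List.pySetD
        (PySem.List.pySetD arr i (PySem.List.pyGetD arr i 0 +
          ((PySem.List.pyRange (i + 1) n 1).foldl
              (fun s j => s + PySem.List.pyGetD a j 0) 0
            - PySem.List.pyGetD a i 0 * (n - i - 1)))) i
        (PySem.List.pyGetD
          (PySem.List.pySetD arr i (PySem.List.pyGetD arr i 0 +
            ((PySem.List.pyRange (i + 1) n 1).foldl
                (fun s j => s + PySem.List.pyGetD a j 0) 0
              - PySem.List.pyGetD a i 0 * (n - i - 1)))) i 0 +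
          (PySem.List.pyGetD a i 0 * i -
            (PySem.List.pyRange 0 i 1).foldl
              (fun s k => s + PySem.List.pyGetD a k 0) 0)))
      ((PySem.List.pyRange 0 lo 1).map (fval n a) ++ List.replicate k 0)
    = (PySem.List.pyRange 0 n 1).map (fval n a) := by
  intro k
  induction k with
  | zero =>
      intro lo h0 h
      rw [PySem.List.pyRange_one_eq_nil (by omega : n ≤ lo)]
      simp [show lo = n by omega]
  | succ m ih =>
      intro lo h0 h
      rw [PySem.List.pyRange_one_cons (by omega : lo < n)]
      simp only [List.foldl_cons]
      have hdone : ((PySem.List.pyRange 0 lo 1).map (fval n a)).length = lo.toNat := by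
        rw [List.length_map, PySem.List.length_pyRange_one]; omega
      set done := (PySem.List.pyRange 0 lo 1).map (fval n a) with hd
      have harr : done ++ List.replicate (m + 1) 0 = done ++ (0 : Int) :: List.replicate m 0 := by
        simp [List.replicate_succ]
      rw [harr]
      have hget : ∀ (v : Int) (rest : List Int),
          PySem.List.pyGetD (done ++ v :: rest) lo 0 = v := by
        intro v rest
        rw [PySem.List.pyGetD_eq_getElem _ 0 h0 (by simp [hdone]; omega)]
        rw [List.getElem_append_right (by omega)]
        simp [hdone]
      have hset : ∀ (v w : Int) (rest : List Int),
          PySem.List.pySetD (done ++ v :: rest) lo w = done ++ w :: rest := by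
        intro v w rest
        rw [PySem.List.pySetD_of_nonneg _ w h0]
        rw [show lo.toNat = done.length + 0 by omega, List.set_append_right]
        · simp
        · omega
      rw [hget, hset, hget, hset]
      have hval : 0 + ((PySem.List.pyRange (lo + 1) n 1).foldl
            (fun s j => s + PySem.List.pyGetD a j 0) 0
              - PySem.List.pyGetD a lo 0 * (n - lo - 1))
          + (PySem.List.pyGetD a lo 0 * lo
              - (PySem.List.pyRange 0 lo 1).foldl (fun s k => s + PySem.List.pyGetD a k 0) 0)
          = fval n a lo := by
        rw [foldSum_eq a m (lo + 1) n 0 (by omega), foldSum_eq a lo.toNat 0 lo 0 (by omega)]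
        unfold fval
        ring
      rw [hval]
      have hstep : done ++ fval n a lo :: List.replicate m 0
          = (PySem.List.pyRange 0 (lo + 1) 1).map (fval n a) ++ List.replicate m 0 := by
        rw [PySem.List.pyRange_one_succ_right h0]
        simp [hd]
      rw [hstep, ih (lo + 1) (by omega) (by omega)]

-- B's loop invariant: running prefix sum and accumulated output.
theorem loopB (n : Int) (a : List Int) :
    ∀ (k : Nat) (lo : Int), 0 ≤ lo → lo + k = n →
    ((PySem.List.pyRange lo n 1).foldl (fun (st : Int × List Int) i =>
        (st.1 + PySem.List.pyGetD a i 0,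
          st.2 ++ [sumIdx a 0 n - st.1 - PySem.List.pyGetD a i 0
            - PySem.List.pyGetD a i 0 * (n - i - 1)
            + PySem.List.pyGetD a i 0 * i - st.1]))
      (sumIdx a 0 lo, (PySem.List.pyRange 0 lo 1).map (fval n a)))
    = (sumIdx a 0 n, (PySem.List.pyRange 0 n 1).map (fval n a)) := by
  intro k
  induction k with
  | zero =>
      intro lo h0 h
      rw [PySem.List.pyRange_one_eq_nil (by omega : n ≤ lo)]
      simp [show lo = n by omega]
  | succ m ih =>
      intro lo h0 h
      rw [PySem.List.pyRange_one_cons (by omega : lo < n)]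
      simp only [List.foldl_cons]
      have hleft : sumIdx a 0 lo + PySem.List.pyGetD a lo 0 = sumIdx a 0 (lo + 1) := by
        rw [sumIdx_split a (by omega : (0:Int) ≤ lo) (by omega : lo ≤ lo + 1),
          sumIdx_cons a (by omega : lo < lo + 1), sumIdx_nil a (by omega : lo + 1 ≤ lo + 1)]
        ring
      have hv : sumIdx a 0 n - sumIdx a 0 lo - PySem.List.pyGetD a lo 0
            - PySem.List.pyGetD a lo 0 * (n - lo - 1)
            + PySem.List.pyGetD a lo 0 * lo - sumIdx a 0 lo = fval n a lo := by
        rw [sumIdx_split a (by omega : (0:Int) ≤ lo) (by omega : lo ≤ n),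
          sumIdx_cons a (by omega : lo < n)]
        unfold fval
        ring
      have hacc : (PySem.List.pyRange 0 lo 1).map (fval n a) ++ [fval n a lo]
          = (PySem.List.pyRange 0 (lo + 1) 1).map (fval n a) := by
        rw [PySem.List.pyRange_one_succ_right h0]; simp
      rw [hleft, hv, hacc]
      exact ih (lo + 1) (by omega) (by omega)

-- ===== VERDICT (by name: the statement is the Claim_ definition above) =====
theorem count_dissatisfaction_spec : Claim_equal_count_dissatisfaction := by
  intro n a _ _
  unfold Spec_count_dissatisfaction count_dissatisfaction count_dissatisfaction_alt
  simp only []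
  by_cases hn : 0 ≤ n
  · rw [foldSum_eq a n.toNat 0 n 0 (by omega)]
    have hA := loopA n a n.toNat 0 (le_refl 0) (by omega)
    rw [PySem.List.pyRange_one_eq_nil (le_refl 0)] at hA
    simp only [List.map_nil, List.nil_append] at hA
    rw [hA]
    have hB := loopB n a n.toNat 0 (le_refl 0) (by omega)
    rw [PySem.List.pyRange_one_eq_nil (le_refl 0), sumIdx_nil a (le_refl 0)] at hB
    simp only [List.map_nil] at hB
    simp only [zero_add] at hB ⊢
    rw [hB]
  · rw [PySem.List.pyRange_one_eq_nil (by omega : n ≤ 0)]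
    simp [show n.toNat = 0 by omega]
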